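-- pv_equiv track=rewrite | github.com/TrainerSquidgy/pokecrystalstarters | Python Scripts/WikiLearnset/generate_wiki_learnset.py | parse_tm_tutor_from_line
-- ===== SOURCE A (Python) =====
-- TYPE_OVERRIDES = {"CURSE_TYPE": "???", "PSYCHIC_TYPE": "Psychic", "PSYCHIC_M": "Psychic"}
--
-- def format_type(t):
--     return TYPE_OVERRIDES.get(t.upper(), t.title())
--
-- def get_category(power):
--     try: return "Damaging" if int(power) > 0 else "Status"
--     except: return "Status"
--
-- def parse_tm_tutor_from_line(line, move_info, tm_map):
--     raw = line.replace("tmhm", "").strip()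
--     all_moves = [m.strip().upper() for m in raw.split(",") if m.strip()]
--
--     tutors = {"FLAMETHROWER": "TU01", "ICE_BEAM": "TU02", "THUNDERBOLT": "TU03"}
--     tutor_moves = []
--     tm_moves = []
--
--     for move in all_moves:
--         if move in tutors:
--             tutor_moves.append(move)
--         else:
--             tm_moves.append(move)
--
--     tm_table = []
--     for move in tm_moves:
--         entry = tm_map.get(move)
--         if not entry:
--             continue
--         label, display_name = entry
--         info = move_info.get(move, {"Power": "-", "Type": "-", "Accuracy": "-", "PP": "-"})
--         tm_table.append({
--             "TM": label,
--             "Move": display_name,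
--             "Type": format_type(info["Type"]),
--             "Category": get_category(info["Power"]),
--             "Power": info["Power"],
--             "Accuracy": info["Accuracy"],
--             "PP": info["PP"]
--         })
--
--     tutor_table = []
--     for move in tutor_moves:
--         label = tutors[move]
--         info = move_info.get(move, {"Power": "-", "Type": "-", "Accuracy": "-", "PP": "-"})
--         tutor_table.append({
--             "Tutor": label,
--             "Move": move.replace("_", " ").title(),
--             "Type": format_type(info["Type"]),
--             "Category": get_category(info["Power"]),
--             "Power": info["Power"],
--             "Accuracy": info["Accuracy"],
--             "PP": info["PP"]
--         })
--
--     return tm_table, tutor_table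
-- ===== SOURCE B (Python) =====
-- TYPE_OVERRIDES = {"CURSE_TYPE": "???", "PSYCHIC_TYPE": "Psychic", "PSYCHIC_M": "Psychic"}
--
-- def format_type(t):
--     return TYPE_OVERRIDES.get(t.upper(), t.title())
--
-- def get_category(power):
--     try: return "Damaging" if int(power) > 0 else "Status"
--     except: return "Status"
--
-- def parse_tm_tutor_from_line(line, move_info, tm_map):
--     tutors = {"FLAMETHROWER": "TU01", "ICE_BEAM": "TU02", "THUNDERBOLT": "TU03"}
--     tm_table = []
--     tutor_table = []
--     for piece in line.replace("tmhm", "").strip().split(","):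
--         stripped = piece.strip()
--         if not stripped:
--             continue
--         move = stripped.upper()
--         info = move_info.get(move, {"Power": "-", "Type": "-", "Accuracy": "-", "PP": "-"})
--         if move in tutors:
--             tutor_table.append({
--                 "Tutor": tutors[move],
--                 "Move": move.replace("_", " ").title(),
--                 "Type": format_type(info["Type"]),
--                 "Category": get_category(info["Power"]),
--                 "Power": info["Power"],
--                 "Accuracy": info["Accuracy"],
--                 "PP": info["PP"]
--             })
--         else:
--             entry = tm_map.get(move)
--             if not entry:
--                 continue
--             label, display_name = entry
--             tm_table.append({
--                 "TM": label,
--                 "Move": display_name,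
--                 "Type": format_type(info["Type"]),
--                 "Category": get_category(info["Power"]),
--                 "Power": info["Power"],
--                 "Accuracy": info["Accuracy"],
--                 "PP": info["PP"]
--             })
--     return tm_table, tutor_table
-- ===== Notes on version B (the rewrite author's own statement) =====
-- stated objective: simpler
-- what changed: Replaces A's three loops (partition into tutor_moves/tm_moves, then one build loop per table) by a single pass over the raw comma pieces that classifies each move and appends the finished row to the right table directly.
import Mathlib
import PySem

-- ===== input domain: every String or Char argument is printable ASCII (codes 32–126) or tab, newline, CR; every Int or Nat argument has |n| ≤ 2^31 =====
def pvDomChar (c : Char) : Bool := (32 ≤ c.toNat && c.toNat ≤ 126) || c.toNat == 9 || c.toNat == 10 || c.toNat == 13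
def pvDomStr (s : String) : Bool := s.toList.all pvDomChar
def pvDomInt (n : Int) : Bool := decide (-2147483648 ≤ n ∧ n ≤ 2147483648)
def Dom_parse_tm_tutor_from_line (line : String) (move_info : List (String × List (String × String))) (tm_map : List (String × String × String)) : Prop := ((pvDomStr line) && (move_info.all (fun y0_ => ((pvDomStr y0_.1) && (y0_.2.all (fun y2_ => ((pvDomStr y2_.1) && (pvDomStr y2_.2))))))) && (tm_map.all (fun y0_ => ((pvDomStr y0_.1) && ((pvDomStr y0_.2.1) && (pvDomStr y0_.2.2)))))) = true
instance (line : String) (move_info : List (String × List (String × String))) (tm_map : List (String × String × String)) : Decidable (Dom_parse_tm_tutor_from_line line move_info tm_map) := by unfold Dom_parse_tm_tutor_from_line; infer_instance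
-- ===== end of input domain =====

-- B folds once over the raw comma pieces, building both tables in one pass instead of
-- A's partition-then-two-build-loops; same return value (objective: simpler).


-- ===== PORT A =====
-- str.title(): a letter is uppercased after a non-letter and lowercased after a letter
-- (exact for the printable-ASCII domain, where Python's "cased" = isalpha).
def pvTitleChars : Bool → List Char → List Char
  | _, [] => []
  | prevAlpha, c :: cs =>
    (if PySem.Chars.isalpha c then
       (if prevAlpha then PySem.Chars.lowerChar c else PySem.Chars.upperChar c)
     else c) :: pvTitleChars (PySem.Chars.isalpha c) cs

def pyTitle (s : String) : String := String.ofList (pvTitleChars false s.toList)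

def TYPE_OVERRIDES : PySem.Dict String String :=
  PySem.Dict.mk [("CURSE_TYPE", "???"), ("PSYCHIC_TYPE", "Psychic"), ("PSYCHIC_M", "Psychic")]

def format_type (t : String) : String :=
  PySem.Dict.getD TYPE_OVERRIDES (PySem.Str.upper t) (pyTitle t)

def get_category (power : String) : String :=
  match PySem.Int.ofStr? power with     -- try: int(power) … except: "Status"
  | some n => if n > 0 then "Damaging" else "Status"
  | none => "Status"

def pvTutors : PySem.Dict String String :=
  PySem.Dict.mk [("FLAMETHROWER", "TU01"), ("ICE_BEAM", "TU02"), ("THUNDERBOLT", "TU03")]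

-- move_info.get(move, {"Power": "-", "Type": "-", "Accuracy": "-", "PP": "-"})
def pvInfoOf (move_info : List (String × List (String × String))) (move : String) : PySem.Dict String String :=
  match (PySem.Dict.mk move_info).get? move with
  | some i => PySem.Dict.mk i
  | none => PySem.Dict.mk [("Power", "-"), ("Type", "-"), ("Accuracy", "-"), ("PP", "-")]

-- info["Power"] etc. ported as getD with an unused default: Pre_ guarantees the key is
-- present (Python raises KeyError otherwise, excluded by Pre_).
def pvTmRow (label display : String) (info : PySem.Dict String String) : List (String × String) :=
  [("TM", label), ("Move", display), ("Type", format_type (info.getD "Type" "")),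
   ("Category", get_category (info.getD "Power" "")), ("Power", info.getD "Power" ""),
   ("Accuracy", info.getD "Accuracy" ""), ("PP", info.getD "PP" "")]

-- tutors[move] ported as getD (the branch guarantees membership).
def pvTutorRow (move : String) (info : PySem.Dict String String) : List (String × String) :=
  [("Tutor", pvTutors.getD move ""), ("Move", pyTitle (PySem.Str.replace move "_" " ")),
   ("Type", format_type (info.getD "Type" "")), ("Category", get_category (info.getD "Power" "")),
   ("Power", info.getD "Power" ""), ("Accuracy", info.getD "Accuracy" ""), ("PP", info.getD "PP" "")]

-- raw.split(","): sep "," is nonempty, so split? is always some; getD [] never fires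
def pvSplitComma (s : String) : List String := (PySem.Str.split? s ",").getD []

-- all_moves = [m.strip().upper() for m in raw.split(",") if m.strip()]
def pvMoves (line : String) : List String :=
  ((pvSplitComma (PySem.Str.strip (PySem.Str.replace line "tmhm" ""))).filter
      (fun m => PySem.Str.strip m ≠ "")).map (fun m => PySem.Str.upper (PySem.Str.strip m))

def pvPartStep (p : List String × List String) (move : String) : List String × List String :=
  if pvTutors.contains move then (p.1 ++ [move], p.2) else (p.1, p.2 ++ [move])

def pvTmStep (move_info : List (String × List (String × String))) (tm_map : List (String × String × String))
    (acc : List (List (String × String))) (move : String) : List (List (String × String)) :=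
  match (PySem.Dict.mk tm_map).get? move with
  | none => acc                         -- if not entry: continue
  | some e => acc ++ [pvTmRow e.1 e.2 (pvInfoOf move_info move)]

def pvTuStep (move_info : List (String × List (String × String)))
    (acc : List (List (String × String))) (move : String) : List (List (String × String)) :=
  acc ++ [pvTutorRow move (pvInfoOf move_info move)]

def parse_tm_tutor_from_line (line : String) (move_info : List (String × List (String × String))) (tm_map : List (String × String × String)) : (List (List (String × String))) × (List (List (String × String))) :=
  let all_moves := pvMoves line
  let part := all_moves.foldl pvPartStep ([], [])    -- (tutor_moves, tm_moves)
  let tm_table := part.2.foldl (pvTmStep move_info tm_map) []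
  let tutor_table := part.1.foldl (pvTuStep move_info) []
  (tm_table, tutor_table)

-- ===== PORT B =====
def pvStepB (move_info : List (String × List (String × String))) (tm_map : List (String × String × String))
    (acc : List (List (String × String)) × List (List (String × String))) (piece : String) :
    List (List (String × String)) × List (List (String × String)) :=
  let stripped := PySem.Str.strip piece
  if stripped = "" then acc             -- if not stripped: continue
  else
    let move := PySem.Str.upper stripped
    let info := pvInfoOf move_info move
    if pvTutors.contains move then (acc.1, acc.2 ++ [pvTutorRow move info])
    else
      match (PySem.Dict.mk tm_map).get? move with
      | none => acc                     -- if not entry: continue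
      | some e => (acc.1 ++ [pvTmRow e.1 e.2 info], acc.2)

def parse_tm_tutor_from_line_alt (line : String) (move_info : List (String × List (String × String))) (tm_map : List (String × String × String)) : (List (List (String × String))) × (List (List (String × String))) :=
  (pvSplitComma (PySem.Str.strip (PySem.Str.replace line "tmhm" ""))).foldl
    (pvStepB move_info tm_map) ([], [])

-- ===== PRECONDITION & SPEC =====
-- Pre_ excludes exactly the inputs on which Python A raises KeyError: a move of the line
-- that is looked up (a tutor move, or one with a tm_map entry) whose move_info dict is
-- present but lacks one of the keys "Power"/"Type"/"Accuracy"/"PP".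
def Pre_parse_tm_tutor_from_line (line : String) (move_info : List (String × List (String × String))) (tm_map : List (String × String × String)) : Prop :=
  ((pvMoves line).all (fun move =>
    !(pvTutors.contains move || ((PySem.Dict.mk tm_map).get? move).isSome) ||
      (match (PySem.Dict.mk move_info).get? move with
       | none => true
       | some info =>
         ["Power", "Type", "Accuracy", "PP"].all (fun k => (PySem.Dict.mk info).contains k)))) = true
instance (line : String) (move_info : List (String × List (String × String))) (tm_map : List (String × String × String)) : Decidable (Pre_parse_tm_tutor_from_line line move_info tm_map) := by unfold Pre_parse_tm_tutor_from_line; infer_instance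

def pvWitness_parse_tm_tutor_from_line : String × (List (String × List (String × String))) × (List (String × String × String)) :=
  ("tmhm surf, flamethrower",
   [("SURF", [("Power", "90"), ("Type", "water"), ("Accuracy", "100"), ("PP", "15")])],
   [("SURF", ("TM05", "Surf"))])

def Spec_parse_tm_tutor_from_line (line : String) (move_info : List (String × List (String × String))) (tm_map : List (String × String × String)) (out : (List (List (String × String))) × (List (List (String × String)))) : Prop := out = parse_tm_tutor_from_line_alt line move_info tm_map
instance (line : String) (move_info : List (String × List (String × String))) (tm_map : List (String × String × String)) (out : (List (List (String × String))) × (List (List (String × String)))) : Decidable (Spec_parse_tm_tutor_from_line line move_info tm_map out) := by unfold Spec_parse_tm_tutor_from_line; infer_instance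

-- ===== CLAIM (what is proved, stated in full; the proofs are below) =====
def Claim_equal_parse_tm_tutor_from_line : Prop := ∀ (line : String) (move_info : List (String × List (String × String))) (tm_map : List (String × String × String)), Dom_parse_tm_tutor_from_line line move_info tm_map → Pre_parse_tm_tutor_from_line line move_info tm_map → Spec_parse_tm_tutor_from_line line move_info tm_map (parse_tm_tutor_from_line line move_info tm_map)

-- ===== LEMMAS AND PROOFS =====
def pvTmRows (move_info : List (String × List (String × String))) (tm_map : List (String × String × String))
    (ms : List String) : List (List (String × String)) :=
  ms.flatMap (fun m =>
    match (PySem.Dict.mk tm_map).get? m with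
    | none => []
    | some e => [pvTmRow e.1 e.2 (pvInfoOf move_info m)])

def pvTuRows (move_info : List (String × List (String × String))) (ms : List String) :
    List (List (String × String)) :=
  ms.map (fun m => pvTutorRow m (pvInfoOf move_info m))

theorem foldl_pvTmStep (move_info : List (String × List (String × String))) (tm_map : List (String × String × String))
    (ms : List String) (acc : List (List (String × String))) :
    ms.foldl (pvTmStep move_info tm_map) acc = acc ++ pvTmRows move_info tm_map ms := by
  induction ms generalizing acc with
  | nil => simp [pvTmRows]
  | cons m ms ih =>
    simp only [List.foldl_cons, ih, pvTmRows, List.flatMap_cons, pvTmStep]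
    cases (PySem.Dict.mk tm_map).get? m <;> simp

theorem foldl_pvTuStep (move_info : List (String × List (String × String)))
    (ms : List String) (acc : List (List (String × String))) :
    ms.foldl (pvTuStep move_info) acc = acc ++ pvTuRows move_info ms := by
  induction ms generalizing acc with
  | nil => simp [pvTuRows]
  | cons m ms ih => simp [List.foldl_cons, ih, pvTuRows, pvTuStep]

theorem foldl_pvPartStep (ms : List String) (a b : List String) :
    ms.foldl pvPartStep (a, b) =
      (a ++ ms.filter (fun m => pvTutors.contains m),
       b ++ ms.filter (fun m => !pvTutors.contains m)) := by
  induction ms generalizing a b with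
  | nil => simp
  | cons m ms ih =>
    simp only [List.foldl_cons, pvPartStep]
    by_cases h : pvTutors.contains m = true <;> simp [h, ih]

theorem foldl_pvStepB (move_info : List (String × List (String × String))) (tm_map : List (String × String × String))
    (ps : List String) (a b : List (List (String × String))) :
    ps.foldl (pvStepB move_info tm_map) (a, b) =
      (a ++ pvTmRows move_info tm_map
          (((ps.filter (fun m => PySem.Str.strip m ≠ "")).map
              (fun m => PySem.Str.upper (PySem.Str.strip m))).filter
            (fun m => !pvTutors.contains m)),
       b ++ pvTuRows move_info
          (((ps.filter (fun m => PySem.Str.strip m ≠ "")).map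
              (fun m => PySem.Str.upper (PySem.Str.strip m))).filter
            (fun m => pvTutors.contains m))) := by
  induction ps generalizing a b with
  | nil => simp [pvTmRows, pvTuRows]
  | cons p ps ih =>
    simp only [List.foldl_cons, pvStepB]
    by_cases hs : PySem.Str.strip p = ""
    · simp [hs, ih]
    · by_cases ht : pvTutors.contains (PySem.Str.upper (PySem.Str.strip p)) = true
      · simp [hs, ht, ih, pvTuRows]
      · cases he : (PySem.Dict.mk tm_map).get? (PySem.Str.upper (PySem.Str.strip p)) with
        | none => simp [hs, ht, he, ih, pvTmRows]
        | some e => simp [hs, ht, he, ih, pvTmRows]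

-- ===== VERDICT (by name: the statement is the Claim_ definition above) =====
theorem parse_tm_tutor_from_line_spec : Claim_equal_parse_tm_tutor_from_line := by
  intro line move_info tm_map _ _
  unfold Spec_parse_tm_tutor_from_line parse_tm_tutor_from_line parse_tm_tutor_from_line_alt
  simp [foldl_pvStepB, foldl_pvPartStep, foldl_pvTmStep, foldl_pvTuStep, pvMoves]
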